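-- pv_equiv track=rewrite | github.com/Mikhail-Lebedinskiy/Polykov2 | CPM/Tur_2/B.py | f
-- ===== SOURCE A (Python) =====
-- def f(partial_sums, i, max_len, len_arr):
--     while True:
--         if i <= max_len + 1:
--             return max_len
--         if partial_sums[i] - partial_sums[i - max_len - 1] <= len_arr - max_len - 2:
--             max_len += 1
--         else:
--             return max_len
-- ===== SOURCE B (Python) =====
-- def f(partial_sums, i, max_len, len_arr):
--     if i <= max_len + 1:
--         return max_len
--     # continue-condition at window length m (with j = i-m-1) rewrites to
--     # partial_sums[j] + j >= partial_sums[i] + i - len_arr + 1 =: t, a constant;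
--     # the loop's answer is i - j* - 1 for j* = the largest j in [1, i-max_len-1]
--     # with partial_sums[j] + j < t, or i - 1 if there is none.
--     t = partial_sums[i] + i - len_arr + 1
--     hits = [j for j in range(1, i - max_len) if partial_sums[j] + j < t]
--     return i - hits[-1] - 1 if hits else i - 1
-- ===== Notes on version B (the rewrite author's own statement) =====
-- stated objective: alternative
-- what changed: Replaces A's stateful loop that grows max_len while re-deriving a window bound each step by an algebraic reformulation: one fixed threshold t = partial_sums[i]+i-len_arr+1, a single ascending pass collecting indices j with partial_sums[j]+j < t, and the answer i-(last hit)-1 (or i-1 if none).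
import Mathlib
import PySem

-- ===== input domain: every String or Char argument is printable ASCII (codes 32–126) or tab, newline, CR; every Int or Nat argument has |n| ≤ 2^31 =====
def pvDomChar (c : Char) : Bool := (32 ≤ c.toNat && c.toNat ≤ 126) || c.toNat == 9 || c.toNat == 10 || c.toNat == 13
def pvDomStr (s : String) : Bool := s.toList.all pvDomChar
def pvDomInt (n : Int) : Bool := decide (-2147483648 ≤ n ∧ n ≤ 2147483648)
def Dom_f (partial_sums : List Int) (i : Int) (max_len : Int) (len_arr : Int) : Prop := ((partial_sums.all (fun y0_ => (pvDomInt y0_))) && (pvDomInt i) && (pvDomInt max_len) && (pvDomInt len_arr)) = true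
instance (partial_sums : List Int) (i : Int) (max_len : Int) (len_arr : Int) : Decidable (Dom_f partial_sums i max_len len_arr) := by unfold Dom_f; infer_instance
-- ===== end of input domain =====

-- B replaces A's stateful window-growing loop by one fixed threshold t = ps[i]+i-len_arr+1 and a single
-- ascending pass collecting the indices j with ps[j]+j < t, returning i-(last hit)-1; same cost class,
-- objective: alternative formulation.

-- ===== PORT A =====
def f (partial_sums : List Int) (i : Int) (max_len : Int) (len_arr : Int) : Int :=
  if i ≤ max_len + 1 then max_len
  else
    match PySem.List.pyGet? partial_sums i, PySem.List.pyGet? partial_sums (i - max_len - 1) with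
    | some a, some b =>
        if a - b ≤ len_arr - max_len - 2 then f partial_sums i (max_len + 1) len_arr
        else max_len
    | _, _ => 0   -- IndexError in Python: excluded by Pre_f
  termination_by (i - max_len).toNat
  decreasing_by omega

-- ===== PORT B =====
def bScan (partial_sums : List Int) (i : Int) (m : Int) (len_arr : Int) : Int :=
  match ((PySem.List.pyRange 1 (i - m) 1).filter
      (fun j => decide ((PySem.List.pyGet? partial_sums j).getD 0 + j
          < (PySem.List.pyGet? partial_sums i).getD 0 + i - len_arr + 1))).getLast? with
  | some j => i - j - 1
  | none => i - 1

def f_alt (partial_sums : List Int) (i : Int) (max_len : Int) (len_arr : Int) : Int :=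
  if i ≤ max_len + 1 then max_len
  else bScan partial_sums i max_len len_arr

-- ===== PRECONDITION & SPEC =====
-- Pre_f is exactly A's non-raising domain: either the loop returns immediately, or the two indices
-- the loop can touch (i, and i-max_len-1 down to 1) stay inside the list, so no IndexError occurs.
def Pre_f (partial_sums : List Int) (i : Int) (max_len : Int) (len_arr : Int) : Prop :=
  i ≤ max_len + 1 ∨
    (-(partial_sums.length : Int) ≤ i ∧ i < partial_sums.length ∧
      i - max_len - 1 < partial_sums.length)
instance (partial_sums : List Int) (i : Int) (max_len : Int) (len_arr : Int) : Decidable (Pre_f partial_sums i max_len len_arr) := by unfold Pre_f; infer_instance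

def pvWitness_f : List Int × Int × Int × Int := ([0, 1, 2, 3], 3, 0, 10)

def Spec_f (partial_sums : List Int) (i : Int) (max_len : Int) (len_arr : Int) (out : Int) : Prop := out = f_alt partial_sums i max_len len_arr
instance (partial_sums : List Int) (i : Int) (max_len : Int) (len_arr : Int) (out : Int) : Decidable (Spec_f partial_sums i max_len len_arr out) := by unfold Spec_f; infer_instance

-- ===== CLAIM (what is proved, stated in full; the proofs are below) =====
def Claim_equal_f : Prop := ∀ (partial_sums : List Int) (i : Int) (max_len : Int) (len_arr : Int), Dom_f partial_sums i max_len len_arr → Pre_f partial_sums i max_len len_arr → Spec_f partial_sums i max_len len_arr (f partial_sums i max_len len_arr)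

-- ===== LEMMAS AND PROOFS =====

-- The loop of A, started at window length m, equals B's single-pass scan started at m.
lemma f_eq_bScan (ps : List Int) (i la : Int) (a : Int)
    (hia : PySem.List.pyGet? ps i = some a) :
    ∀ (n : Nat) (m : Int), (i - m - 1).toNat = n → i - m - 1 < (ps.length : Int) →
      m + 1 ≤ i → f ps i m la = bScan ps i m la := by
  intro n
  induction n with
  | zero =>
      intro m hn hlt hle
      have him : i = m + 1 := by omega
      rw [f, if_pos (by omega)]
      rw [bScan, PySem.List.pyRange_one_eq_nil (by omega)]
      simp
      omega
  | succ n ih =>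
      intro m hn hlt hle
      have h1 : 1 ≤ i - m - 1 := by omega
      have hb : PySem.List.pyGet? ps (i - m - 1)
          = some (ps[(i - m - 1).toNat]'(by omega)) :=
        PySem.List.pyGet?_eq_some_getElem ps (by omega) (by omega)
      set b := ps[(i - m - 1).toNat]'(by omega) with hbdef
      have hsplit : PySem.List.pyRange 1 (i - m) 1
          = PySem.List.pyRange 1 (i - m - 1) 1 ++ [i - m - 1] := by
        have := PySem.List.pyRange_one_succ_right (a := 1) (b := i - m - 1) (by omega)
        simpa [show i - m - 1 + 1 = i - m by ring] using this
      rw [f, if_neg (by omega), hia, hb]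
      show (if a - b ≤ la - m - 2 then f ps i (m + 1) la else m) = bScan ps i m la
      by_cases hc : a - b ≤ la - m - 2
      · rw [if_pos hc]
        have hrec := ih (m + 1) (by omega) (by omega) (by omega)
        rw [hrec]
        -- bScan (m+1) = bScan m : the extra endpoint i-m-1 is filtered out
        rw [bScan, bScan, hsplit, List.filter_append]
        have hpred : (decide ((PySem.List.pyGet? ps (i - m - 1)).getD 0 + (i - m - 1)
            < (PySem.List.pyGet? ps i).getD 0 + i - la + 1)) = false := by
          rw [hia, hb]; simp; omega
        simp only [List.filter_cons, List.filter_nil, hpred]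
        simp [show i - (m + 1) = i - m - 1 by ring]
      · rw [if_neg hc]
        rw [bScan, hsplit, List.filter_append]
        have hpred : (decide ((PySem.List.pyGet? ps (i - m - 1)).getD 0 + (i - m - 1)
            < (PySem.List.pyGet? ps i).getD 0 + i - la + 1)) = true := by
          rw [hia, hb]; simp; omega
        simp only [List.filter_cons, List.filter_nil, hpred, if_pos]
        rw [List.getLast?_append]
        simp
        omega

-- ===== VERDICT (by name: the statement is the Claim_ definition above) =====
theorem f_spec : Claim_equal_f := by
  intro ps i ml la _ hpre
  unfold Spec_f
  by_cases hg : i ≤ ml + 1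
  · rw [f, if_pos hg, f_alt, if_pos hg]
  · rcases hpre with h | ⟨hlo, hhi, hwin⟩
    · exact absurd h hg
    · have hin : PySem.Raise.InRange ps.length i := by
        constructor <;> omega
      obtain ⟨a, hia⟩ : ∃ a, PySem.List.pyGet? ps i = some a := by
        cases h : PySem.List.pyGet? ps i with
        | none => exact absurd hin ((PySem.List.pyGet?_eq_none_iff ps i).mp h)
        | some a => exact ⟨a, rfl⟩
      rw [f_alt, if_neg hg]
      exact f_eq_bScan ps i la a hia ((i - ml - 1).toNat) ml rfl (by omega) (by omega)
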